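-- pv_equiv track=rewrite | github.com/lukamileticc/Minimum-sum-coloring | brute_force_msc.py | minimum_color_sum
-- ===== SOURCE A (Python) =====
-- from collections import Counter
--
-- def minimum_color_sum(colors_vector):
--
--     #[1,2,4,7,1,3,6,7,7,2,4] boje svakog cvora
--     #[(1,2),(2,2),(3,1),(4,2),(6,1),(7,3)] broj pojavljivanja svake boje
--     #[(7,3),(4,2),(2,2),(1,2),(6,1),(3,1)] sortiramo po boju pojavljivanja tj.drugom parametru
--     # 3*1 + 2*2 + 2*3 + 2*4 + 1*5 + 1*6  funkcija cilja=suma(broj_pojavljuvanja*indeks_unizu)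
--
--     tmp = list(map(lambda el: (el,1),colors_vector))
--     tmp = list(set([(el[0], Counter(tmp)[el]) for el in tmp]))
--     tmp = sorted(tmp, key = lambda el: el[1],reverse=True)
--
--     total_sum = 0
--     for index,tupp in enumerate(tmp):
--         total_sum += (index+1)*tupp[1]
--
--     return total_sum
-- ===== SOURCE B (Python) =====
-- from collections import Counter
--
-- def minimum_color_sum(colors_vector):
--     counts = sorted(Counter(colors_vector).values(), reverse=True)
--     return sum(i * c for i, c in enumerate(counts, 1))
-- ===== Notes on version B (the rewrite author's own statement) =====
-- stated objective: faster
-- what changed: Counts each color once with Counter and sorts only the counts, replacing A's per-element Counter-rebuild/dedup of (color,count) pairs with a single count-then-sort pass.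
import Mathlib
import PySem

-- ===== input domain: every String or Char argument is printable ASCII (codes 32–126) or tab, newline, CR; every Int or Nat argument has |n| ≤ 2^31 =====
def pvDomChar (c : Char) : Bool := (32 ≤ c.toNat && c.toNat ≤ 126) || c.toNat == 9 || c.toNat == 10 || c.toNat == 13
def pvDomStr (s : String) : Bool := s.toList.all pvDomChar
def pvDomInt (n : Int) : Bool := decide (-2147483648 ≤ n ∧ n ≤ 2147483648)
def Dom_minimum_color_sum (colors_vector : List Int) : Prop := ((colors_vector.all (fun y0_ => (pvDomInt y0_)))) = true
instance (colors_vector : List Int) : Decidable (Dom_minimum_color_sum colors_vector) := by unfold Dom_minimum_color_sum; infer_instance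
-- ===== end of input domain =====

-- B counts each color once with Counter and sorts only the counts (O(n log n)), replacing A's
-- per-element Counter-rebuild and pair-dedup (O(n^2)); the weighted sum by rank is unchanged.


-- ===== PORT A =====
-- Literal port of A: tmp = [(el,1) for el in colors]; tmp = list(set([(el[0], Counter(tmp)[el]) for el in tmp]));
-- sorted by el[1] reverse; total_sum accumulated over enumerate. list(set(..)) order is hash-dependent in Python;
-- the returned SUM is order-independent among equal counts, so first-occurrence order (PySem.Set.ofList) is faithful to the return value.
def minimum_color_sum (colors_vector : List Int) : Int :=
  let tmp := colors_vector.map (fun el => (el, (1 : Int)))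
  let c := PySem.Dict.counter tmp
  let tmp2 := PySem.Set.ofList (tmp.map (fun el => (el.1, c.getD el 0)))
  let tmp3 := PySem.List.sorted tmp2 (fun el => el.2) true
  (PySem.List.enumerate tmp3 0).foldl (fun s p => s + (p.1 + 1) * p.2.2) 0

-- ===== PORT B =====
def minimum_color_sum_alt (colors_vector : List Int) : Int :=
  let counts := PySem.List.sorted (PySem.Dict.counter colors_vector).values (fun x => x) true
  ((PySem.List.enumerate counts 1).map (fun p => p.1 * p.2)).sum

-- ===== PRECONDITION & SPEC =====
def Spec_minimum_color_sum (colors_vector : List Int) (out : Int) : Prop := out = minimum_color_sum_alt colors_vector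
instance (colors_vector : List Int) (out : Int) : Decidable (Spec_minimum_color_sum colors_vector out) := by unfold Spec_minimum_color_sum; infer_instance

-- ===== CLAIM (what is proved, stated in full; the proofs are below) =====
def Claim_equal_minimum_color_sum : Prop := ∀ (colors_vector : List Int), Dom_minimum_color_sum colors_vector → Spec_minimum_color_sum colors_vector (minimum_color_sum colors_vector)

-- ===== LEMMAS AND PROOFS =====

-- set(xs.map g) = (set xs).map g when g is injective (A maps colors to distinct (color,count) pairs before dedup)
theorem pv_ofList_map {A B : Type} [BEq A] [LawfulBEq A] [BEq B] [LawfulBEq B] (g : A → B)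
    (hg : Function.Injective g) (xs : List A) :
    PySem.Set.ofList (xs.map g) = (PySem.Set.ofList xs).map g := by
  have key : ∀ (l : List A) (acc : List A),
      (l.map g).foldl PySem.Set.add (acc.map g) = (l.foldl PySem.Set.add acc).map g := by
    intro l
    induction l with
    | nil => intro acc; rfl
    | cons x t ih =>
      intro acc
      have hc : (PySem.Set.contains (acc.map g) (g x)) = PySem.Set.contains acc x := by
        simp [PySem.Set.contains, hg.eq_iff]
      have hadd : PySem.Set.add (acc.map g) (g x) = (PySem.Set.add acc x).map g := by
        simp only [PySem.Set.add, hc]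
        split <;> simp
      simpa [hadd] using ih (PySem.Set.add acc x)
  simpa using key xs []

-- the counts of a stable sort by the second component are the sorted counts
theorem pv_map_snd_sorted (L : List (Int × Int)) :
    (PySem.List.sorted L (fun el => el.2) true).map (fun el => el.2)
      = PySem.List.sorted (L.map (fun el => el.2)) (fun x => x) true := by
  refine List.Perm.eq_of_pairwise (le := fun a b : Int => b ≤ a)
    (fun a b _ _ h1 h2 => le_antisymm h2 h1)
    (List.Pairwise.map _ (fun a b h => h) (PySem.List.sorted_pairwise_rev L (fun el => el.2)))
    (PySem.List.sorted_pairwise_rev (L.map (fun el => el.2)) (fun x => x))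
    (((PySem.List.sorted_perm L (fun el => el.2) true).map _).trans
      (PySem.List.sorted_perm (L.map (fun el => el.2)) (fun x => x) true).symm)

-- A's enumerate-fold equals B's enumerate-map-sum over the counts
theorem pv_fold_sum (l : List (Int × Int)) (s : Int) (a : Int) :
    (PySem.List.enumerate l s).foldl (fun acc p => acc + (p.1 + 1) * p.2.2) a
      = a + ((PySem.List.enumerate (l.map (fun el => el.2)) (s + 1)).map (fun p => p.1 * p.2)).sum := by
  induction l generalizing s a with
  | nil => simp [PySem.List.enumerate_nil]
  | cons x t ih =>
    simp only [List.map_cons, PySem.List.enumerate_cons, List.foldl_cons, List.map_cons, List.sum_cons]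
    rw [ih (s + 1) (a + (s + 1) * x.2)]
    ring

-- ===== VERDICT (by name: the statement is the Claim_ definition above) =====
theorem minimum_color_sum_spec : Claim_equal_minimum_color_sum := by
  intro colors _
  unfold Spec_minimum_color_sum minimum_color_sum minimum_color_sum_alt
  have hinj : Function.Injective (fun x : Int => (x, (colors.count x : Int))) := by
    intro a b h; exact (Prod.mk.injEq _ _ _ _ ▸ h).1
  have e1 : (colors.map (fun el => (el, (1 : Int)))).map
      (fun el => (el.1, (PySem.Dict.counter (colors.map (fun el => (el, (1 : Int))))).getD el 0))
      = colors.map (fun x => (x, (colors.count x : Int))) := by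
    simp only [List.map_map]
    refine List.map_congr_left (fun x _ => ?_)
    simp only [Function.comp, PySem.Dict.getD_counter]
    congr 1
    exact_mod_cast List.count_map_of_injective colors (fun el => (el, (1 : Int)))
      (fun a b h => (Prod.mk.injEq _ _ _ _ ▸ h).1) x
  simp only [e1, pv_map_snd_sorted, pv_fold_sum]
  have e3 : (PySem.Dict.counter colors).values
      = ((PySem.Set.ofList colors).map (fun x : Int => (x, (colors.count x : Int)))).map (fun el => el.2) := by
    have := PySem.Dict.items_counter (xs := colors)
    simp only [PySem.Dict.values, this]
  rw [e3]
  simp [pv_ofList_map _ hinj, List.map_map]
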